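-- pv_equiv track=rewrite | github.com/mohammadfaiizan/ProjectI | DSA/Problem/Dynamic Programming/03_Knapsack_Problems/1155_Number_of_Dice_Rolls_With_Target_Sum.py | num_rolls_to_target_with_sequences
-- ===== SOURCE A (Python) =====
-- def num_rolls_to_target_optimized(n, k, target):
--     """
--     OPTIMIZED DP WITH EARLY TERMINATION:
--     ===================================
--     Add optimizations and early termination checks.
--
--     Time Complexity: O(n * target * k) - worst case, often better
--     Space Complexity: O(target) - 1D DP array
--     """
--     MOD = 10**9 + 7
--
--     # Early termination checks
--     if target < n or target > n * k:
--         return 0  # Impossible to reach target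
--
--     if n == 1:
--         return 1 if 1 <= target <= k else 0
--
--     dp = [0] * (target + 1)
--     dp[0] = 1
--
--     for i in range(n):
--         new_dp = [0] * (target + 1)
--
--         # Optimize range: only consider reachable sums
--         min_sum = max(1, target - (n - i - 1) * k)  # Minimum possible with remaining dice
--         max_sum = min(target, (i + 1) * k)          # Maximum possible with current dice
--
--         for j in range(min_sum, max_sum + 1):
--             for face in range(1, min(k, j) + 1):
--                 if j >= face:
--                     new_dp[j] = (new_dp[j] + dp[j - face]) % MOD
--
--         dp = new_dp
--
--     return dp[target]
--
-- def num_rolls_to_target_with_sequences(n, k, target):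
--     """
--     FIND ACTUAL SEQUENCES (FOR SMALL INPUTS):
--     =========================================
--     Generate actual dice sequences that sum to target.
--
--     Time Complexity: O(k^n) - generate all sequences
--     Space Complexity: O(k^n) - store sequences
--     """
--     if n > 10 or k > 6:  # Avoid explosion for large inputs
--         return num_rolls_to_target_optimized(n, k, target), []
--
--     def generate_sequences(dice_left, current_target, current_sequence):
--         if dice_left == 0:
--             if current_target == 0:
--                 return [current_sequence[:]]
--             else:
--                 return []
--
--         if current_target <= 0:
--             return []
--
--         sequences = []
--         for face in range(1, k + 1):
--             current_sequence.append(face)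
--             sequences.extend(generate_sequences(dice_left - 1,
--                                               current_target - face,
--                                               current_sequence))
--             current_sequence.pop()
--
--         return sequences
--
--     all_sequences = generate_sequences(n, target, [])
--     return len(all_sequences), all_sequences
-- ===== SOURCE B (Python) =====
-- from itertools import product
--
-- def num_rolls_to_target_optimized(n, k, target):
--     # B's version of the module DP helper: same guards, but each DP row is
--     # rebuilt as a comprehension with a sum, instead of nested in-place updates.
--     MOD = 10**9 + 7
--     if target < n or target > n * k:
--         return 0
--     if n == 1:
--         return 1 if 1 <= target <= k else 0
--     dp = [1] + [0] * target
--     for i in range(n):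
--         lo = max(1, target - (n - i - 1) * k)
--         hi = min(target, (i + 1) * k)
--         dp = [sum(dp[j - f] for f in range(1, min(k, j) + 1)) % MOD
--               if lo <= j <= hi else 0
--               for j in range(target + 1)]
--     return dp[target]
--
-- def num_rolls_to_target_with_sequences(n, k, target):
--     """Small inputs: exhaustive enumeration via itertools.product instead of
--     recursive backtracking; large inputs: DP count via the helper above."""
--     if n > 10 or k > 6:
--         return num_rolls_to_target_optimized(n, k, target), []
--     if n < 0:
--         return 0, []  # no sequence has a negative number of dice
--     result = [list(t) for t in product(range(1, k + 1), repeat=n) if sum(t) == target]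
--     return len(result), result
-- ===== Notes on version B (the rewrite author's own statement) =====
-- stated objective: idiomatic
-- what changed: The recursive backtracking generator (mutating a shared current_sequence) is replaced by an exhaustive itertools.product enumeration filtered by sum (plus a direct (0, []) return for negative n, where A's recursion finds nothing); the large-input branch keeps the same delegating call to the module's DP helper.
import Mathlib
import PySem

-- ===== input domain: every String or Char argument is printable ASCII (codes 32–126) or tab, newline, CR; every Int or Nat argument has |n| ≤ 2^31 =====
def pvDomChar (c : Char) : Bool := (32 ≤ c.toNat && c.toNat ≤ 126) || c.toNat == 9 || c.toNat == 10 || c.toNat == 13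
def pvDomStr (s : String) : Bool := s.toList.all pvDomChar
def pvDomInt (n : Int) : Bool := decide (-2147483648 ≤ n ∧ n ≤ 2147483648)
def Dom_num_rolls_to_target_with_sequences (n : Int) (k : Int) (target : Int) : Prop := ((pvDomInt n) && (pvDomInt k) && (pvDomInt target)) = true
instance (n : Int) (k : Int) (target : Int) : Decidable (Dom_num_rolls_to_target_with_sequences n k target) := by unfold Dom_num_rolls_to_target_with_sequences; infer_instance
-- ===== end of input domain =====

-- B replaces the recursive backtracking generator by an itertools.product
-- enumeration filtered by sum, and rebuilds each DP row of the large-input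
-- helper as a comprehension-with-sum instead of nested in-place updates;
-- the return value is proved equal on every domain input.

-- ===== PORT A =====
-- A's copy of the module helper num_rolls_to_target_optimized; every list index
-- taken inside it is in range on every input the entry function reaches, so
-- pyGetD/pySetD are exact here.
def num_rolls_to_target_optimized (n : Int) (k : Int) (target : Int) : Int :=
  let MOD : Int := 10 ^ 9 + 7
  if target < n ∨ target > n * k then 0
  else if n = 1 then (if 1 ≤ target ∧ target ≤ k then 1 else 0)
  else
    let dp0 : List Int := PySem.List.pySetD (List.replicate (target + 1).toNat 0) 0 1
    let dp := (PySem.List.pyRange 0 n 1).foldl (fun dp i =>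
      let min_sum := max 1 (target - (n - i - 1) * k)
      let max_sum := min target ((i + 1) * k)
      (PySem.List.pyRange min_sum (max_sum + 1) 1).foldl (fun new_dp j =>
        (PySem.List.pyRange 1 (min k j + 1) 1).foldl (fun new_dp face =>
          if j ≥ face then
            PySem.List.pySetD new_dp j
              (PySem.Int.mod (PySem.List.pyGetD new_dp j 0 + PySem.List.pyGetD dp (j - face) 0) MOD)
          else new_dp) new_dp) (List.replicate (target + 1).toNat 0)) dp0
    PySem.List.pyGetD dp target 0

-- generate_sequences: the mutated current_sequence is passed functionally (append = ++ [face],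
-- copy at the base case); termination is Python's: current_target strictly decreases.
def pvGenSeqs (k : Int) (dice_left : Int) (current_target : Int) (current_sequence : List Int) : List (List Int) :=
  if dice_left = 0 then (if current_target = 0 then [current_sequence] else [])
  else if h : current_target ≤ 0 then []
  else
    ((PySem.List.pyRange 1 (k + 1) 1).attach).foldl
      (fun sequences face =>
        sequences ++ pvGenSeqs k (dice_left - 1) (current_target - face.1) (current_sequence ++ [face.1]))
      []
termination_by current_target.toNat
decreasing_by
  have hf := (PySem.List.mem_pyRange_one).1 face.2
  omega

def num_rolls_to_target_with_sequences (n : Int) (k : Int) (target : Int) : Int × List (List Int) :=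
  if n > 10 ∨ k > 6 then (num_rolls_to_target_optimized n k target, [])
  else
    let all_sequences := pvGenSeqs k n target []
    ((all_sequences.length : Int), all_sequences)

-- ===== PORT B =====
-- B's copy of the helper: each DP row rebuilt as a comprehension with a sum
def num_rolls_to_target_optimized_alt (n : Int) (k : Int) (target : Int) : Int :=
  let MOD : Int := 10 ^ 9 + 7
  if target < n ∨ target > n * k then 0
  else if n = 1 then (if 1 ≤ target ∧ target ≤ k then 1 else 0)
  else
    let dp0 : List Int := 1 :: List.replicate target.toNat 0
    let dp := (PySem.List.pyRange 0 n 1).foldl (fun dp i =>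
      let lo := max 1 (target - (n - i - 1) * k)
      let hi := min target ((i + 1) * k)
      (PySem.List.pyRange 0 (target + 1) 1).map (fun j =>
        if lo ≤ j ∧ j ≤ hi then
          PySem.Int.mod (((PySem.List.pyRange 1 (min k j + 1) 1).map
            (fun f => PySem.List.pyGetD dp (j - f) 0)).sum) MOD
        else 0)) dp0
    PySem.List.pyGetD dp target 0

def num_rolls_to_target_with_sequences_alt (n : Int) (k : Int) (target : Int) : Int × List (List Int) :=
  if n > 10 ∨ k > 6 then (num_rolls_to_target_optimized_alt n k target, [])
  else if n < 0 then (0, [])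
  else
    -- itertools.product(range(1, k+1), repeat=n): lexicographic, first coordinate slowest
    let tuples := (List.range n.toNat).foldl
      (fun acc _ => acc.flatMap (fun s => (PySem.List.pyRange 1 (k + 1) 1).map (fun f => s ++ [f]))) [[]]
    let result := tuples.filter (fun s => s.sum == target)
    ((result.length : Int), result)

-- ===== PRECONDITION & SPEC =====
def Spec_num_rolls_to_target_with_sequences (n : Int) (k : Int) (target : Int) (out : Int × List (List Int)) : Prop := out = num_rolls_to_target_with_sequences_alt n k target
instance (n : Int) (k : Int) (target : Int) (out : Int × List (List Int)) : Decidable (Spec_num_rolls_to_target_with_sequences n k target out) := by unfold Spec_num_rolls_to_target_with_sequences; infer_instance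

-- ===== CLAIM (what is proved, stated in full; the proofs are below) =====
def Claim_equal_num_rolls_to_target_with_sequences : Prop := ∀ (n : Int) (k : Int) (target : Int), Dom_num_rolls_to_target_with_sequences n k target → Spec_num_rolls_to_target_with_sequences n k target (num_rolls_to_target_with_sequences n k target)

-- ===== LEMMAS AND PROOFS =====

theorem pvModFoldE (M : Int) (g : Int → Int) :
    ∀ (l : List Int) (a : Int),
      l.foldl (fun acc f => (acc + g f) % M) (a % M) = (a + (l.map g).sum) % M := by
  intro l
  induction l with
  | nil => simp
  | cons x xs ih =>
    intro a
    simp only [List.foldl_cons, List.map_cons, List.sum_cons]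
    rw [Int.emod_add_emod, ih (a + g x)]
    ring_nf

theorem pvModFold (M : Int) (hM : 0 < M) (g : Int → Int) (l : List Int) :
    l.foldl (fun acc f => PySem.Int.mod (acc + g f) M) 0 = PySem.Int.mod ((l.map g).sum) M := by
  simp only [PySem.Int.mod_eq_emod_of_pos hM]
  have h0 : (0 : Int) = 0 % M := by simp
  rw [h0, pvModFoldE M g l 0, Int.zero_add]

theorem pvSetD_noop {α : Type} (xs : List α) (i : Int) (v : α)
    (h : ¬ PySem.Raise.InRange xs.length i) : PySem.List.pySetD xs i v = xs := by
  simp [PySem.List.pySetD, (PySem.List.pySet?_eq_none_iff xs i v).2 h]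

theorem pvNotInRange (len : Nat) (j : Int) (hj : 0 ≤ j) (h : ¬ j.toNat < len) :
    ¬ PySem.Raise.InRange len j := by
  simp [PySem.Raise.InRange]
  omega

theorem pvInnerCollapse (M : Int) (j : Int) (hj : 0 ≤ j) (d : Int → Int) :
    ∀ (faces : List Int) (nd : List Int),
    faces.foldl (fun nd f => PySem.List.pySetD nd j (PySem.Int.mod (PySem.List.pyGetD nd j 0 + d f) M)) nd
      = PySem.List.pySetD nd j (faces.foldl (fun a f => PySem.Int.mod (a + d f) M) (PySem.List.pyGetD nd j 0)) := by
  intro faces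
  induction faces with
  | nil =>
    intro nd
    simp only [List.foldl_nil]
    by_cases h : j.toNat < nd.length
    · rw [PySem.List.pySetD_of_nonneg _ _ hj, PySem.List.pyGetD_eq_getElem _ _ hj (by omega)]
      exact (List.set_getElem_self h).symm
    · rw [pvSetD_noop _ _ _ (pvNotInRange _ _ hj h)]
  | cons f fs ih =>
    intro nd
    simp only [List.foldl_cons]
    rw [ih]
    by_cases h : j.toNat < nd.length
    · rw [PySem.List.pySetD_of_nonneg _ _ hj, PySem.List.pySetD_of_nonneg _ _ hj,
        PySem.List.pySetD_of_nonneg _ _ hj, List.set_set]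
      congr 1
      rw [PySem.List.pyGetD_eq_getElem _ _ hj (by simp; omega), List.getElem_set_self,
        PySem.List.pyGetD_eq_getElem _ _ hj (by omega)]
    · have hno : ∀ w : Int, PySem.List.pySetD nd j w = nd := fun w =>
        pvSetD_noop _ _ _ (pvNotInRange _ _ hj h)
      rw [hno, hno, hno]

theorem pvSetFold (G : Int → Int → Int) :
    ∀ (js : List Int) (init : List Int), js.Nodup → (∀ j ∈ js, 0 ≤ j ∧ j.toNat < init.length) →
    ∀ (idx : Nat),
    (js.foldl (fun nd j => PySem.List.pySetD nd j (G j (PySem.List.pyGetD nd j 0))) init)[idx]?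
      = if ((idx : Int) ∈ js) then some (G (idx : Int) (init.getD idx 0)) else init[idx]? := by
  intro js
  induction js with
  | nil => intro init _ _ idx; simp
  | cons j0 rest ih =>
    intro init hnd hr idx
    obtain ⟨hj0, hj0len⟩ := hr j0 (List.mem_cons_self)
    simp only [List.foldl_cons]
    rw [PySem.List.pySetD_of_nonneg _ _ hj0,
      PySem.List.pyGetD_eq_getElem _ _ hj0 (by omega)]
    have hlen' : (init.set j0.toNat (G j0 init[j0.toNat])).length = init.length := by simp
    rw [ih (init.set j0.toNat (G j0 init[j0.toNat])) hnd.of_cons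
      (fun j hj => by rw [hlen']; exact hr j (List.mem_cons_of_mem _ hj))]
    by_cases heq : (idx : Int) = j0
    · subst heq
      have hj0r : ((idx : Int)) ∉ rest := (List.nodup_cons.1 hnd).1
      simp only [Int.toNat_natCast] at hj0len ⊢
      rw [if_neg hj0r, List.getElem?_set_self (by omega), if_pos List.mem_cons_self,
        List.getD_eq_getElem?_getD, List.getElem?_eq_getElem (by omega)]
      simp
    · have hne : j0.toNat ≠ idx := by omega
      have hcond : ((idx:Int) ∈ j0 :: rest) ↔ ((idx:Int) ∈ rest) := by
        simp [List.mem_cons, heq]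
      by_cases hmem : (idx : Int) ∈ rest
      · rw [if_pos hmem, if_pos (hcond.2 hmem)]
        congr 2
        rw [List.getD_eq_getElem?_getD, List.getD_eq_getElem?_getD, List.getElem?_set_ne hne]
      · rw [if_neg hmem, if_neg (fun hc => hmem (hcond.1 hc)), List.getElem?_set_ne hne]

theorem pvRow (k target : Int) (ht : 0 ≤ target) (lo hi : Int) (hlo : 1 ≤ lo) (hhi : hi ≤ target)
    (dp : List Int) :
    (PySem.List.pyRange lo (hi + 1) 1).foldl
      (fun nd j => (PySem.List.pyRange 1 (min k j + 1) 1).foldl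
        (fun nd face => if j ≥ face then
            PySem.List.pySetD nd j (PySem.Int.mod
              (PySem.List.pyGetD nd j 0 + PySem.List.pyGetD dp (j - face) 0) (10 ^ 9 + 7))
          else nd) nd)
      (List.replicate (target + 1).toNat 0)
    = (PySem.List.pyRange 0 (target + 1) 1).map
        (fun j => if lo ≤ j ∧ j ≤ hi then
          PySem.Int.mod (((PySem.List.pyRange 1 (min k j + 1) 1).map
            (fun f => PySem.List.pyGetD dp (j - f) 0)).sum) (10 ^ 9 + 7)
        else 0) := by
  have hM : (0:Int) < 10 ^ 9 + 7 := by norm_num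
  -- turn the inner face loop into a single set
  rw [PySem.List.foldl_congr_mem _ _
    (fun nd j => PySem.List.pySetD nd j
      (((PySem.List.pyRange 1 (min k j + 1) 1)).foldl
        (fun a f => PySem.Int.mod (a + PySem.List.pyGetD dp (j - f) 0) (10 ^ 9 + 7))
        (PySem.List.pyGetD nd j 0))) _
    (by
      intro nd j hj
      have hj1 := PySem.List.mem_pyRange_one.1 hj
      rw [PySem.List.foldl_congr_mem _ _
        (fun nd face => PySem.List.pySetD nd j (PySem.Int.mod
          (PySem.List.pyGetD nd j 0 + PySem.List.pyGetD dp (j - face) 0) (10 ^ 9 + 7))) _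
        (by
          intro acc face hface
          have hf := PySem.List.mem_pyRange_one.1 hface
          rw [if_pos (by omega)])]
      exact pvInnerCollapse _ j (by omega) _ _ nd)]
  have hnodup := PySem.List.nodup_pyRange_one lo (hi + 1)
  have hrng : ∀ j ∈ PySem.List.pyRange lo (hi + 1) 1,
      0 ≤ j ∧ j.toNat < (List.replicate (target + 1).toNat (0:Int)).length := by
    intro j hj
    have := PySem.List.mem_pyRange_one.1 hj
    refine ⟨by omega, ?_⟩
    simp only [List.length_replicate]; omega
  have hsf := pvSetFold
    (fun j v => (PySem.List.pyRange 1 (min k j + 1) 1).foldl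
      (fun a f => PySem.Int.mod (a + PySem.List.pyGetD dp (j - f) 0) (10 ^ 9 + 7)) v)
    (PySem.List.pyRange lo (hi + 1) 1) (List.replicate (target + 1).toNat 0) hnodup hrng
  apply List.ext_getElem?
  intro idx
  rw [hsf idx]
  have hlen : ((target + 1).toNat : Int) = target + 1 := by omega
  by_cases hidx : idx < (target + 1).toNat
  · have hB := PySem.List.getElem?_map_pyRange_zero
      (fun j => if lo ≤ j ∧ j ≤ hi then
        PySem.Int.mod (((PySem.List.pyRange 1 (min k j + 1) 1).map
          (fun f => PySem.List.pyGetD dp (j - f) 0)).sum) (10 ^ 9 + 7)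
      else 0) (target + 1).toNat idx hidx
    rw [hlen] at hB
    rw [hB]
    by_cases hmem : ((idx : Int)) ∈ PySem.List.pyRange lo (hi + 1)
    · have hm := PySem.List.mem_pyRange_one.1 hmem
      rw [if_pos hmem]
      beta_reduce
      rw [if_pos (by omega : lo ≤ (idx:Int) ∧ (idx:Int) ≤ hi)]
      have hg : (List.replicate (target + 1).toNat (0:Int)).getD idx 0 = 0 := by
        simp [List.getD_eq_getElem?_getD, hidx]
      rw [hg, pvModFold _ hM]
    · have hm := fun h => hmem (PySem.List.mem_pyRange_one.2 h)
      rw [if_neg hmem]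
      beta_reduce
      rw [if_neg (fun h : lo ≤ (idx:Int) ∧ (idx:Int) ≤ hi => hm ⟨h.1, by omega⟩)]
      simp [hidx]
  · have h1 : (List.replicate (target + 1).toNat (0:Int))[idx]? = none := by
      rw [List.getElem?_eq_none]; simp; omega
    rw [if_neg (by
      intro hmem
      have := PySem.List.mem_pyRange_one.1 hmem
      omega), h1]
    rw [List.getElem?_eq_none]
    simp only [List.length_map, PySem.List.length_pyRange_one]
    omega

theorem pvOpt_eq (n k target : Int) (hbig : 10 < n ∨ 6 < k) :
    num_rolls_to_target_optimized n k target = num_rolls_to_target_optimized_alt n k target := by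
  unfold num_rolls_to_target_optimized num_rolls_to_target_optimized_alt
  by_cases h1 : target < n ∨ target > n * k
  · simp only [h1, if_true]
  · simp only [h1, if_false]
    simp only [not_or, not_lt] at h1
    by_cases h2 : n = 1
    · simp only [h2, if_true]
    · simp only [h2, if_false]
      have ht : 0 ≤ target := by
        rcases hbig with hn | hk
        · omega
        · by_contra htneg
          have hn0 : n ≤ -1 := by omega
          have h6 : (1 : Int) * 6 ≤ (-n) * (k - 1) :=
            mul_le_mul (by omega) (by omega) (by omega) (by omega)
          nlinarith [h1.1, h1.2]
      have hinit : PySem.List.pySetD (List.replicate (target + 1).toNat (0:Int)) 0 1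
          = 1 :: List.replicate target.toNat 0 := by
        rw [PySem.List.pySetD_of_nonneg _ _ (by omega : (0:Int) ≤ 0)]
        rw [show (target + 1).toNat = target.toNat + 1 from by omega, List.replicate_succ]
        simp
      rw [hinit]
      congr 1
      apply PySem.List.foldl_congr_mem
      intro acc i _
      exact pvRow k target ht _ _ (by omega) (by omega) acc

-- foldl-over-attach of 'sequences.extend(...)' as a flatMap (List.foldl_attach does not rw here)
theorem pv_foldl_attach (l : List Int) (g : Int → List (List Int)) (acc : List (List Int)) :
    l.attach.foldl (fun s f => s ++ g f.1) acc = acc ++ l.flatMap g := by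
  induction l generalizing acc with
  | nil => simp
  | cons x xs ih => simp [List.attach_cons, List.foldl_map, ih]

-- the full k-ary sequence space of length m, built front-first (lexicographic order)
def pvS (k : Int) : Nat → List (List Int)
  | 0 => [[]]
  | m + 1 => (PySem.List.pyRange 1 (k + 1) 1).flatMap (fun f => (pvS k m).map (f :: ·))

theorem pvS_ext (k : Int) (m : Nat) :
    (pvS k m).flatMap (fun s => (PySem.List.pyRange 1 (k + 1) 1).map (fun f => s ++ [f]))
      = pvS k (m + 1) := by
  induction m with
  | zero => simp [pvS]; exact List.map_eq_flatMap
  | succ m ih =>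
    rw [pvS, pvS]
    rw [← ih]
    simp only [List.flatMap_assoc, List.flatMap_map, List.cons_append, List.map_flatMap,
      List.map_map, Function.comp_def]

-- B's tuple enumeration equals pvS
theorem pvT_eq_pvS (k : Int) (m : Nat) :
    (List.range m).foldl
      (fun acc _ => acc.flatMap (fun s => (PySem.List.pyRange 1 (k + 1) 1).map (fun f => s ++ [f]))) [[]]
      = pvS k m := by
  induction m with
  | zero => simp [pvS]
  | succ m ih => rw [List.range_succ, List.foldl_append, List.foldl_cons, List.foldl_nil, ih, pvS_ext]

theorem pvS_sum_ge (k : Int) (m : Nat) : ∀ s ∈ pvS k m, (m : Int) ≤ s.sum := by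
  induction m with
  | zero => simp [pvS]
  | succ m ih =>
    intro s hs
    simp only [pvS, List.mem_flatMap, List.mem_map] at hs
    obtain ⟨f, hf, t, ht, rfl⟩ := hs
    have hf1 := (PySem.List.mem_pyRange_one).1 hf
    have := ih t ht
    simp only [List.sum_cons]
    push_cast
    omega

-- A's backtracking equals: filter pvS by sum, prefix cur
theorem pvGenSeqs_eq (k : Int) (m : Nat) :
    ∀ (t : Int) (cur : List Int),
      pvGenSeqs k (m : Int) t cur = ((pvS k m).filter (fun s => s.sum == t)).map (cur ++ ·) := by
  induction m with
  | zero =>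
    intro t cur
    rw [pvGenSeqs]
    by_cases ht : t = 0
    · subst ht; simp [pvS]
    · have hb : ((0 : Int) == t) = false := by simp; omega
      simp [pvS, List.filter, hb, ht]
  | succ m ih =>
    intro t cur
    rw [pvGenSeqs]
    have hne : ((m + 1 : Nat) : Int) ≠ 0 := by push_cast; omega
    rw [if_neg hne]
    by_cases ht : t ≤ 0
    · rw [dif_pos ht]
      have : (pvS k (m + 1)).filter (fun s => s.sum == t) = [] := by
        rw [List.filter_eq_nil_iff]
        intro s hs
        have := pvS_sum_ge k (m + 1) s hs
        simp only [beq_iff_eq]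
        push_cast at this
        omega
      rw [this]; simp
    · rw [dif_neg ht]
      have hfl := pv_foldl_attach (PySem.List.pyRange 1 (k + 1) 1)
        (fun f => pvGenSeqs k ((((m : Nat) + 1 : Nat) : Int) - 1) (t - f) (cur ++ [f])) []
      rw [hfl]
      have hcast : ((m + 1 : Nat) : Int) - 1 = (m : Int) := by push_cast; omega
      rw [hcast]
      simp only [ih]
      rw [pvS, List.filter_flatMap, List.map_flatMap]
      apply List.flatMap_congr
      intro f _
      rw [List.filter_map, List.map_map]
      have hpred : ((fun s => s.sum == t) ∘ (f :: ·)) = (fun s : List Int => s.sum == t - f) := by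
        funext s
        simp only [Function.comp_apply, List.sum_cons]
        rw [Bool.eq_iff_iff]
        simp only [beq_iff_eq]
        omega
      rw [hpred]
      congr 1
      funext s
      simp

theorem pvGenSeqs_neg (k : Int) :
    ∀ (ct : Nat) (t : Int), t.toNat ≤ ct → ∀ d : Int, d < 0 → ∀ cur, pvGenSeqs k d t cur = [] := by
  intro ct
  induction ct with
  | zero =>
    intro t hct d hd cur
    rw [pvGenSeqs, if_neg (by omega), dif_pos (by omega)]
  | succ c ihc =>
    intro t hct d hd cur
    rw [pvGenSeqs, if_neg (by omega : ¬ d = 0)]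
    by_cases ht : t ≤ 0
    · rw [dif_pos ht]
    · rw [dif_neg ht]
      have hfl := pv_foldl_attach (PySem.List.pyRange 1 (k + 1) 1)
        (fun f => pvGenSeqs k (d - 1) (t - f) (cur ++ [f])) []
      rw [hfl]
      have : ∀ f ∈ PySem.List.pyRange 1 (k + 1) 1,
          pvGenSeqs k (d - 1) (t - f) (cur ++ [f]) = [] := by
        intro f hf
        have hf1 := (PySem.List.mem_pyRange_one).1 hf
        exact ihc (t - f) (by omega) (d - 1) (by omega) _
      rw [List.flatMap_congr this]
      simp

-- ===== VERDICT (by name: the statement is the Claim_ definition above) =====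
theorem num_rolls_to_target_with_sequences_spec : Claim_equal_num_rolls_to_target_with_sequences := by
  intro n k target _
  unfold Spec_num_rolls_to_target_with_sequences
  unfold num_rolls_to_target_with_sequences num_rolls_to_target_with_sequences_alt
  by_cases hbig : n > 10 ∨ k > 6
  · rw [if_pos hbig, if_pos hbig, pvOpt_eq n k target hbig]
  · rw [if_neg hbig, if_neg hbig]
    by_cases hn : n < 0
    · rw [if_pos hn]
      rw [pvGenSeqs_neg k target.toNat target le_rfl n hn []]
      simp
    · rw [if_neg hn]
      obtain ⟨m, rfl⟩ := Int.eq_ofNat_of_zero_le (by omega : (0:Int) ≤ n)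
      rw [pvGenSeqs_eq k m target [], Int.toNat_natCast, pvT_eq_pvS]
      simp
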